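-- pv_equiv track=rewrite | github.com/sj175/Betaworks_AoC | solutions/Python/2018_d4_p2.py | separate_days
-- ===== SOURCE A (Python) =====
-- def separate_days(lines):
-- 	output = []
-- 	current = []
-- 	for i in range(0, len(lines)):
-- 		if "Guard" in lines[i]:
-- 			output.append(current)
-- 			current = []
--
-- 		current.append(lines[i])
--
-- 	return output[1:]
-- ===== SOURCE B (Python) =====
-- def separate_days(lines):
--     marks = [i for i, line in enumerate(lines) if "Guard" in line]
--     return [lines[a:b] for a, b in zip(marks, marks[1:])]
-- ===== Notes on version B (the rewrite author's own statement) =====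
-- stated objective: simpler
-- what changed: Replaced A's running-buffer fold (mutable output/current lists plus a final [1:] to drop the pre-guard dummy) with an index table: one comprehension collects the guard-line indices, then the result is the slices between consecutive indices via zip(marks, marks[1:]).
import Mathlib
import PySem

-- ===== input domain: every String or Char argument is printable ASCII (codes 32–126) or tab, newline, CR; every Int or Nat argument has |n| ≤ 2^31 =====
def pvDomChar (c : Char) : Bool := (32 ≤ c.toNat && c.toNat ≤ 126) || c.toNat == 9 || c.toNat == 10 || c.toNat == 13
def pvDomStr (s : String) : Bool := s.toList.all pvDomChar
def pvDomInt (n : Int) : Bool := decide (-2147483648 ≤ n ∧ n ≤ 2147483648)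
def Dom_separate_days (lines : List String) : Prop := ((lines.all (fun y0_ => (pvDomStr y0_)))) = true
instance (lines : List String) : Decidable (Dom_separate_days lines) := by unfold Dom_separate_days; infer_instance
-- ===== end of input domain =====

-- B replaces A's running-buffer accumulation by a guard-index table plus slicing; objective: simpler.
-- Like A, both emit only the groups between consecutive "Guard" lines (the segment after the last guard is not emitted).

-- ===== PORT A =====
def separate_days (lines : List String) : List (List String) :=
  let st := (PySem.List.pyRange 0 (PySem.List.len lines) 1).foldl
    (fun (st : List (List String) × List String) i =>
      let line := PySem.List.pyGetD lines i ""   -- lines[i]: i is always in range in this loop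
      let st := if PySem.Str.isIn "Guard" line then (st.1 ++ [st.2], ([] : List String)) else st
      (st.1, st.2 ++ [line])) (([] : List (List String)), ([] : List String))
  PySem.List.slice st.1 (some 1) none

-- ===== PORT B =====
def separate_days_alt (lines : List String) : List (List String) :=
  let marks := (PySem.List.enumerate lines 0).filterMap
    (fun p => if PySem.Str.isIn "Guard" p.2 then some p.1 else none)
  (marks.zip (marks.drop 1)).map (fun ab => PySem.List.slice lines (some ab.1) (some ab.2))

-- ===== PRECONDITION & SPEC =====
def Spec_separate_days (lines : List String) (out : List (List String)) : Prop := out = separate_days_alt lines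
instance (lines : List String) (out : List (List String)) : Decidable (Spec_separate_days lines out) := by unfold Spec_separate_days; infer_instance

-- ===== CLAIM (what is proved, stated in full; the proofs are below) =====
def Claim_equal_separate_days : Prop := ∀ (lines : List String), Dom_separate_days lines → Spec_separate_days lines (separate_days lines)

-- ===== LEMMAS AND PROOFS =====

def pvGd (l : String) : Bool := PySem.Str.isIn "Guard" l

-- A's loop body, named so the pyRange fold can be rewritten
def pvStep (st : List (List String) × List String) (line : String) :
    List (List String) × List String :=
  let st := if pvGd line then (st.1 ++ [st.2], ([] : List String)) else st
  (st.1, st.2 ++ [line])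

-- A's loop as structural recursion on the remaining lines: emitted groups and current buffer
def pvGo (cur : List String) : List String → List (List String) × List String
  | [] => ([], cur)
  | l :: rest =>
      if pvGd l then
        let r := pvGo [l] rest
        (cur :: r.1, r.2)
      else pvGo (cur ++ [l]) rest

-- groups emitted while a buffer is open
def pvT (buf : List String) : List String → List (List String)
  | [] => []
  | l :: rest => if pvGd l then buf :: pvT [l] rest else pvT (buf ++ [l]) rest

-- the common spec: the groups between consecutive guard lines
def pvS : List String → List (List String)
  | [] => []
  | l :: rest => if pvGd l then pvT [l] rest else pvS rest

-- guard indices, as Nats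
def pvMk : List String → List Nat
  | [] => []
  | l :: rest => (if pvGd l then [0] else []) ++ (pvMk rest).map (· + 1)

theorem pvGo_fst (xs : List String) : ∀ buf, (pvGo buf xs).1 = pvT buf xs := by
  induction xs with
  | nil => intro buf; rfl
  | cons l rest ih =>
      intro buf
      by_cases h : pvGd l = true <;> simp [pvGo, pvT, h, ih]

theorem pvFoldl_go (xs : List String) :
    ∀ (out : List (List String)) (cur : List String),
      xs.foldl pvStep (out, cur) = (out ++ (pvGo cur xs).1, (pvGo cur xs).2) := by
  induction xs with
  | nil => intro out cur; simp [pvGo]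
  | cons l rest ih =>
      intro out cur
      by_cases h : pvGd l = true
      · simp only [List.foldl_cons, pvStep, pvGo, h, if_true]
        simp [ih]
      · simp only [List.foldl_cons, pvStep, pvGo, h]
        simp [ih]

theorem pvT_tail (xs : List String) : ∀ buf, (pvT buf xs).tail = pvS xs := by
  induction xs with
  | nil => intro buf; rfl
  | cons l rest ih =>
      intro buf
      by_cases h : pvGd l = true <;> simp [pvT, pvS, h, ih]

-- A equals the common spec
theorem pvA_eq_S (lines : List String) : separate_days lines = pvS lines := by
  have hA : separate_days lines
      = PySem.List.slice (((PySem.List.pyRange 0 (PySem.List.len lines) 1).foldl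
          (fun acc j => pvStep acc (PySem.List.pyGetD lines j ""))
          (([] : List (List String)), ([] : List String))).1) (some 1) none := rfl
  rw [hA, PySem.List.foldl_pyRange_zero_pyGetD lines "" pvStep
        (([] : List (List String)), ([] : List String)),
      pvFoldl_go, PySem.List.slice_from_one]
  simp [pvGo_fst, pvT_tail]

-- the index table with starting offset s, reduced to the Nat table
theorem pvMarks_eq (xs : List String) : ∀ (s : Int),
    (PySem.List.enumerate xs s).filterMap
      (fun p => if PySem.Str.isIn "Guard" p.2 then some p.1 else none)
    = (pvMk xs).map (fun k : Nat => s + (k : Int)) := by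
  induction xs with
  | nil => intro s; simp [PySem.List.enumerate_nil, pvMk]
  | cons l rest ih =>
      intro s
      have htail : ((pvMk rest).map (· + 1)).map (fun k : Nat => s + (k : Int))
          = (pvMk rest).map (fun k : Nat => (s + 1) + (k : Int)) := by
        rw [List.map_map]
        refine List.map_congr_left (fun k _ => ?_)
        simp only [Function.comp_apply]
        push_cast; ring
      rw [PySem.List.enumerate_cons]
      by_cases h : PySem.Chars.isIn ['G','u','a','r','d'] l.toList = true
      · rw [List.filterMap_cons_some (b := s) (by simp [h]), ih (s + 1)]
        rw [show pvMk (l :: rest) = 0 :: (pvMk rest).map (· + 1) by simp [pvMk, pvGd, h]]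
        rw [List.map_cons, htail]
        simp
      · rw [List.filterMap_cons_none (by simp [Bool.not_eq_true] at h; simp [h]), ih (s + 1)]
        rw [show pvMk (l :: rest) = (pvMk rest).map (· + 1) by simp [pvMk, pvGd, h]]
        rw [htail]

theorem pvT_char (xs : List String) : ∀ buf,
    pvT buf xs = match pvMk xs with
      | [] => []
      | a :: _ => (buf ++ xs.take a) :: pvS xs := by
  induction xs with
  | nil => intro buf; rfl
  | cons l rest ih =>
      intro buf
      by_cases h : pvGd l = true
      · simp [pvT, pvS, pvMk, h]
      · cases hm : pvMk rest with
        | nil => simp [pvT, pvMk, h, ih, hm]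
        | cons a t => simp [pvT, pvS, pvMk, h, ih, hm]

-- the Nat-index/slice form of B
def pvBn (xs : List String) : List (List String) :=
  ((pvMk xs).zip ((pvMk xs).drop 1)).map (fun ab => (xs.drop ab.1).take (ab.2 - ab.1))

-- prepending one line shifts every index by one and leaves the slices unchanged
theorem pvZipShift (l : String) (rest : List String) (m : List Nat) :
    ((m.map (· + 1)).zip ((m.map (· + 1)).drop 1)).map
      (fun ab => ((l :: rest).drop ab.1).take (ab.2 - ab.1))
    = (m.zip (m.drop 1)).map (fun ab => (rest.drop ab.1).take (ab.2 - ab.1)) := by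
  rw [← List.map_drop, List.zip_map, List.map_map]
  refine List.map_congr_left (fun ab _ => ?_)
  simp [Nat.succ_sub_succ]

theorem pvBn_eq_S (xs : List String) : pvBn xs = pvS xs := by
  induction xs with
  | nil => rfl
  | cons l rest ih =>
      by_cases h : pvGd l = true
      · have hT := pvT_char rest [l]
        cases hm : pvMk rest with
        | nil =>
            rw [hm] at hT
            simp [pvBn, pvMk, pvS, h, hm, hT]
        | cons a t =>
            rw [hm] at hT
            have hmk : pvMk (l :: rest) = 0 :: (a + 1) :: t.map (· + 1) := by
              simp [pvMk, h, hm]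
            have hzip : ((a + 1) :: t.map (· + 1)).zip (t.map (· + 1))
                = ((a :: t).zip t).map (Prod.map (· + 1) (· + 1)) := by
              rw [show ((a + 1) :: t.map (· + 1)) = (a :: t).map (· + 1) from rfl,
                List.zip_map]
            rw [pvS, if_pos h, hT, ← ih]
            unfold pvBn
            rw [hmk, hm]
            simp only [List.drop_succ_cons, List.drop_zero]
            rw [List.zip_cons_cons, hzip, List.map_cons, List.map_map]
            refine List.cons_eq_cons.mpr ⟨by simp, ?_⟩
            refine List.map_congr_left (fun ab _ => ?_)
            obtain ⟨x, y⟩ := ab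
            simp [Nat.succ_sub_succ]
      · have hmk : pvMk (l :: rest) = (pvMk rest).map (· + 1) := by
          simp [pvMk, h]
        rw [pvS, if_neg h, ← ih]
        unfold pvBn
        rw [hmk, pvZipShift]

-- B equals the Nat-index form
theorem pvB_eq_Bn (lines : List String) : separate_days_alt lines = pvBn lines := by
  unfold separate_days_alt
  rw [pvMarks_eq lines 0]
  simp only [zero_add]
  rw [← List.map_drop, List.zip_map, List.map_map]
  refine List.map_congr_left (fun ab _ => ?_)
  simp [PySem.List.slice_natCast]

-- ===== VERDICT (by name: the statement is the Claim_ definition above) =====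
theorem separate_days_spec : Claim_equal_separate_days := by
  intro lines _
  unfold Spec_separate_days
  rw [pvA_eq_S, pvB_eq_Bn, pvBn_eq_S]
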